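-- pv_equiv track=rewrite | github.com/illtown/true_color_test | true_color_test.py | gen_clr_codes_lst
-- ===== SOURCE A (Python) =====
-- def gen_clr_code_step_lst(scale):
--     ''' helper func to gen list of color code steps '''
--     step = 2**scale
--     tmp_lst = list(range(-1, 256, step))
--     tmp_lst[0] = 0
--     return tmp_lst
--
-- def gen_clr_codes_lst(clr_nmbr, scale):
--     ''' gen color codes list '''
--     if clr_nmbr <= 1:
--         return [[clr_code] for clr_code in gen_clr_code_step_lst(scale)]
--     else:
--         rest_clr_code_lst = gen_clr_codes_lst(clr_nmbr - 1, scale)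
--
--     tmp_lst = []
--     for clr_code in gen_clr_code_step_lst(scale):
--         for item in rest_clr_code_lst:
--             tmp_lst.append([clr_code] + item)
--     return tmp_lst
-- ===== SOURCE B (Python) =====
-- def gen_clr_codes_lst(clr_nmbr, scale):
--     ''' gen color codes list: iterative product build growing the rightmost coordinate '''
--     step = 2 ** scale
--     steps = [0] + list(range(-1 + step, 256, step))
--     result = [[c] for c in steps]
--     for _ in range(clr_nmbr - 1):
--         result = [item + [c] for item in result for c in steps]
--     return result
-- ===== Notes on version B (the rewrite author's own statement) =====
-- stated objective: alternative
-- what changed: Replaces the recursion on clr_nmbr (prepending the leftmost coordinate over a recursive rest list with nested append loops) by an iterative build that computes the step list directly ([0] + range starting at -1+step, no first-element mutation) and extends every list on the RIGHT, appending the new rightmost coordinate clr_nmbr-1 times; both enumerate the product in the same lexicographic order.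
import Mathlib
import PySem

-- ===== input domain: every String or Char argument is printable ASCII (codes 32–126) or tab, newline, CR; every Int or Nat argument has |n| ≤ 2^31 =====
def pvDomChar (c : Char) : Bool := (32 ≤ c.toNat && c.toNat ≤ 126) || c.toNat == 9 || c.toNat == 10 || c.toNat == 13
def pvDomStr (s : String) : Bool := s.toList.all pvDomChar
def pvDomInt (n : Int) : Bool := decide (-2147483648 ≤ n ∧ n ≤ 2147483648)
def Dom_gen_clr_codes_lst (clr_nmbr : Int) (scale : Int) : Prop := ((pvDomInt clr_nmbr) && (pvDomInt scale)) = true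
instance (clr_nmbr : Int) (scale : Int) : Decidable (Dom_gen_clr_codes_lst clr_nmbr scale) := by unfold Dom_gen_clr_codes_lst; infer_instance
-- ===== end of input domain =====

-- B replaces A's recursion (prepending the leftmost coordinate) by an iterative build
-- that computes the step list directly and appends the new rightmost coordinate
-- clr_nmbr-1 times; both enumerate the product in the same order.

-- ===== PORT A =====
-- helper: step = 2**scale; list(range(-1, 256, step)); tmp_lst[0] = 0.
-- (for scale ≥ 0, i.e. inside Pre_, the range list is nonempty; the [] branch is unreachable)
def gen_clr_code_step_lst (scale : Int) : List Int :=
  let step : Int := 2 ^ scale.toNat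
  match PySem.List.pyRange (-1) 256 step with
  | [] => []
  | _ :: t => 0 :: t

def gen_clr_codes_lst (clr_nmbr : Int) (scale : Int) : List (List Int) :=
  if clr_nmbr ≤ 1 then
    (gen_clr_code_step_lst scale).map (fun clr_code => [clr_code])
  else
    let rest_clr_code_lst := gen_clr_codes_lst (clr_nmbr - 1) scale
    (gen_clr_code_step_lst scale).foldl
      (fun tmp_lst clr_code =>
        rest_clr_code_lst.foldl (fun t item => t ++ [clr_code :: item]) tmp_lst) []
termination_by clr_nmbr.toNat
decreasing_by omega

-- ===== PORT B =====
def gen_clr_codes_lst_alt (clr_nmbr : Int) (scale : Int) : List (List Int) :=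
  let step : Int := 2 ^ scale.toNat
  let steps : List Int := 0 :: PySem.List.pyRange (-1 + step) 256 step
  let result : List (List Int) := steps.map (fun c => [c])
  (PySem.List.pyRange 0 (clr_nmbr - 1) 1).foldl
    (fun res _ => res.flatMap (fun item => steps.map (fun c => item ++ [c]))) result

-- ===== PRECONDITION & SPEC =====
-- Pre_ excludes scale < 0, where Python's 2**scale is a float and range(…, float)
-- raises TypeError in A (and in B).
def Pre_gen_clr_codes_lst (clr_nmbr : Int) (scale : Int) : Prop := 0 ≤ scale
instance (clr_nmbr : Int) (scale : Int) : Decidable (Pre_gen_clr_codes_lst clr_nmbr scale) := by unfold Pre_gen_clr_codes_lst; infer_instance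
def pvWitness_gen_clr_codes_lst : Int × Int := (2, 7)

def Spec_gen_clr_codes_lst (clr_nmbr : Int) (scale : Int) (out : List (List Int)) : Prop := out = gen_clr_codes_lst_alt clr_nmbr scale
instance (clr_nmbr : Int) (scale : Int) (out : List (List Int)) : Decidable (Spec_gen_clr_codes_lst clr_nmbr scale out) := by unfold Spec_gen_clr_codes_lst; infer_instance

-- ===== CLAIM (what is proved, stated in full; the proofs are below) =====
def Claim_equal_gen_clr_codes_lst : Prop := ∀ (clr_nmbr : Int) (scale : Int), Dom_gen_clr_codes_lst clr_nmbr scale → Pre_gen_clr_codes_lst clr_nmbr scale → Spec_gen_clr_codes_lst clr_nmbr scale (gen_clr_codes_lst clr_nmbr scale)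

-- ===== LEMMAS AND PROOFS =====

-- the two product-extension passes: prepend a new leftmost coordinate / append a new rightmost one
def pvPre (steps : List Int) (res : List (List Int)) : List (List Int) :=
  steps.flatMap (fun c => res.map (fun item => c :: item))
def pvApp (steps : List Int) (res : List (List Int)) : List (List Int) :=
  res.flatMap (fun item => steps.map (fun c => item ++ [c]))

-- range with a positive step, cons form
theorem pyRange_cons_pos (a b s : Int) (hs : 0 < s) (hab : a < b) :
    PySem.List.pyRange a b s = a :: PySem.List.pyRange (a + s) b s := by
  rw [PySem.List.pyRange_of_pos a b hs, PySem.List.pyRange_of_pos (a + s) b hs]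
  rw [if_pos hab]
  by_cases h2 : a + s < b
  · rw [if_pos h2]
    have hN : ((b - a + s - 1) / s).toNat = ((b - (a + s) + s - 1) / s).toNat + 1 := by
      have : b - a + s - 1 = (b - (a + s) + s - 1) + 1 * s := by ring
      rw [this, Int.add_mul_ediv_right _ _ (by omega : s ≠ 0)]
      have h0 : 0 ≤ (b - (a + s) + s - 1) / s :=
        Int.ediv_nonneg (by omega) (by omega)
      omega
    rw [hN, List.range_succ_eq_map]
    simp only [List.map_cons, List.map_map]
    refine List.cons_eq_cons.mpr ⟨by simp, ?_⟩
    apply List.map_congr_left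
    intro k _
    simp only [Function.comp_apply]
    push_cast
    ring
  · rw [if_neg h2]
    have hN : ((b - a + s - 1) / s).toNat = 1 := by
      have hx : b - a + s - 1 = (b - a - 1) + 1 * s := by ring
      rw [hx, Int.add_mul_ediv_right _ _ (by omega : s ≠ 0)]
      have h0 : (b - a - 1) / s = 0 := Int.ediv_eq_zero_of_lt (by omega) (by omega)
      omega
    rw [hN]
    simp

-- B's directly-built step list is A's helper's list
theorem steps_eq (scale : Int) :
    (0 : Int) :: PySem.List.pyRange (-1 + 2 ^ scale.toNat) 256 (2 ^ scale.toNat) =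
      gen_clr_code_step_lst scale := by
  unfold gen_clr_code_step_lst
  show _ = (match PySem.List.pyRange (-1) 256 (2 ^ scale.toNat) with
    | [] => ([] : List Int)
    | _ :: t => 0 :: t)
  rw [pyRange_cons_pos (-1) 256 (2 ^ scale.toNat) (by positivity) (by norm_num)]

-- A at n = k+1 equals k prepend passes starting from the singleton lists
theorem genA_eq_iter (scale : Int) (k : Nat) :
    gen_clr_codes_lst ((k : Int) + 1) scale =
      (pvPre (gen_clr_code_step_lst scale))^[k]
        ((gen_clr_code_step_lst scale).map (fun c => [c])) := by
  induction k with
  | zero => rw [gen_clr_codes_lst]; simp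
  | succ k ih =>
    have hc : (((k + 1 : Nat)) : Int) + 1 = (k : Int) + 1 + 1 := by push_cast; ring
    rw [hc, gen_clr_codes_lst]
    have hgt : ¬ ((k : Int) + 1 + 1 ≤ 1) := by omega
    rw [if_neg hgt]
    show (gen_clr_code_step_lst scale).foldl
        (fun tmp_lst clr_code =>
          (gen_clr_codes_lst ((k : Int) + 1 + 1 - 1) scale).foldl
            (fun t item => t ++ [clr_code :: item]) tmp_lst) [] = _
    have harg : ((k : Int) + 1 + 1 - 1) = (k : Int) + 1 := by ring
    rw [harg, ih, Function.iterate_succ_apply']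
    set rest := (pvPre (gen_clr_code_step_lst scale))^[k]
        ((gen_clr_code_step_lst scale).map (fun c => [c])) with hrest
    have hfun : (fun (tmp_lst : List (List Int)) clr_code =>
        rest.foldl (fun t item => t ++ [clr_code :: item]) tmp_lst) =
        fun tmp_lst clr_code => tmp_lst ++ rest.map (fun item => clr_code :: item) := by
      funext tmp_lst clr_code
      exact PySem.List.foldl_append_singleton_eq_map (fun item => clr_code :: item) rest tmp_lst
    rw [hfun, PySem.List.foldl_append_eq_flatMap]
    simp [pvPre]

-- the two passes commute
theorem pre_app_comm (steps : List Int) (res : List (List Int)) :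
    pvPre steps (pvApp steps res) = pvApp steps (pvPre steps res) := by
  simp only [pvPre, pvApp, List.map_flatMap, List.flatMap_assoc, List.flatMap_map,
    List.map_map, Function.comp_def, List.cons_append]

-- they agree on the singleton initial list
theorem pre_app_base (steps : List Int) :
    pvPre steps (steps.map (fun c => [c])) = pvApp steps (steps.map (fun c => [c])) := by
  simp only [pvPre, pvApp, List.flatMap_map, List.map_map,
    Function.comp_def, List.singleton_append]

theorem pre_iter_succ (steps : List Int) (k : Nat) :
    (pvPre steps)^[k + 1] (steps.map (fun c => [c])) =
      pvApp steps ((pvPre steps)^[k] (steps.map (fun c => [c]))) := by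
  induction k with
  | zero => simpa using pre_app_base steps
  | succ k ih =>
    calc (pvPre steps)^[k + 1 + 1] (steps.map (fun c => [c]))
        = pvPre steps ((pvPre steps)^[k + 1] (steps.map (fun c => [c]))) :=
          Function.iterate_succ_apply' _ _ _
      _ = pvPre steps (pvApp steps ((pvPre steps)^[k] (steps.map (fun c => [c])))) := by rw [ih]
      _ = pvApp steps (pvPre steps ((pvPre steps)^[k] (steps.map (fun c => [c])))) :=
          pre_app_comm _ _
      _ = pvApp steps ((pvPre steps)^[k + 1] (steps.map (fun c => [c]))) :=
          congrArg (pvApp steps) (Function.iterate_succ_apply' _ _ _).symm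

-- k append passes = k prepend passes
theorem app_iter_eq_pre_iter (steps : List Int) (k : Nat) :
    (pvApp steps)^[k] (steps.map (fun c => [c])) =
      (pvPre steps)^[k] (steps.map (fun c => [c])) := by
  induction k with
  | zero => rfl
  | succ k ih =>
    rw [Function.iterate_succ_apply', ih, ← pre_iter_succ, Function.iterate_succ_apply']

-- a foldl over a range that ignores the index is an iterate
theorem foldl_const_iterate {α : Type} (f : α → α) (k : Nat) (init : α) :
    (List.range k).foldl (fun a _ => f a) init = f^[k] init := by
  induction k with
  | zero => rfl
  | succ k ih => rw [List.range_succ, List.foldl_append, Function.iterate_succ_apply']; simp [ih]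

-- B as an iterate of the append pass over A's step list
theorem genB_eq_iter (clr_nmbr scale : Int) :
    gen_clr_codes_lst_alt clr_nmbr scale =
      (pvApp (gen_clr_code_step_lst scale))^[(clr_nmbr - 1).toNat]
        ((gen_clr_code_step_lst scale).map (fun c => [c])) := by
  unfold gen_clr_codes_lst_alt
  show (PySem.List.pyRange 0 (clr_nmbr - 1) 1).foldl
      (fun res _ => res.flatMap (fun item =>
        (((0:Int) :: PySem.List.pyRange (-1 + 2 ^ scale.toNat) 256 (2 ^ scale.toNat)).map
          (fun c => item ++ [c]))))
      (((0:Int) :: PySem.List.pyRange (-1 + 2 ^ scale.toNat) 256 (2 ^ scale.toNat)).map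
        (fun c => [c])) = _
  rw [steps_eq, PySem.List.pyRange_one, List.foldl_map]
  have hfc := foldl_const_iterate
    (fun res : List (List Int) =>
      res.flatMap (fun item => (gen_clr_code_step_lst scale).map (fun c => item ++ [c])))
    (clr_nmbr - 1 - 0).toNat
    ((gen_clr_code_step_lst scale).map (fun c => [c]))
  rw [hfc]
  have h0 : clr_nmbr - 1 - 0 = clr_nmbr - 1 := by ring
  rw [h0]
  rfl

-- ===== VERDICT (by name: the statement is the Claim_ definition above) =====
theorem gen_clr_codes_lst_spec : Claim_equal_gen_clr_codes_lst := by
  intro clr_nmbr scale _hdom _hpre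
  unfold Spec_gen_clr_codes_lst
  rw [genB_eq_iter, app_iter_eq_pre_iter]
  by_cases h : clr_nmbr ≤ 0
  · have h0 : (clr_nmbr - 1).toNat = 0 := by omega
    rw [h0, gen_clr_codes_lst, if_pos (by omega : clr_nmbr ≤ 1)]
    simp
  · have hn : clr_nmbr = ((clr_nmbr - 1).toNat : Int) + 1 := by omega
    have h := genA_eq_iter scale (clr_nmbr - 1).toNat
    rw [← hn] at h
    exact h
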